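-- pv_equiv track=rewrite | github.com/luizhtc/luizhtc-portfolio | estudos_de_python/aulas_exercicios_UFABC/Processamento_Da_Informacao_2020/Luiz_Trinca_E8.py | exercicio2
-- ===== SOURCE A (Python) =====
-- def exercicio2(A:list) -> bool:
--   transp, iden, C, valor = [], [], [], 0
--   for i in range(len(A[0])):
--     transp.append([A[j][i] for j in range(len(A))])
--   for j in range(len(A)):
--     iden.append([])
--     for k in range(len(A)):
--       if j != k:
--         iden[j].append(0)
--       else:
--         iden[j].append(1)
--   for l in range(len(A)):
--     C.append([])
--     for m in range(len(A)):
--       C[l].append(0)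
--   for a in range(len(A)):
--     for b in range(len(A)):
--       for m in range(len(A)):
--         valor += (A[a][m] * transp[m][b])
--       C[a][b] = valor
--       valor = 0
--   if(C == iden):
--     return True
--   else: return False
-- ===== SOURCE B (Python) =====
-- def exercicio2(A: list) -> bool:
--     n = len(A)
--     for a in range(n):
--         for b in range(n):
--             s = 0
--             for m in range(n):
--                 s += A[a][m] * A[b][m]
--             if s != (1 if a == b else 0):
--                 return False
--     return True
-- ===== Notes on version B (the rewrite author's own statement) =====
-- stated objective: simpler
-- what changed: B drops the explicitly built transpose, identity and product matrices: it checks each dot product A[a]Β·A[b] against the Kronecker delta directly and returns False at the first mismatch; Pre_ restricts to the inputs where A returns (non-empty, rows at least as long as row 0, len(A) <= len(A[0])), elsewhere A raises IndexError.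
import Mathlib
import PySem

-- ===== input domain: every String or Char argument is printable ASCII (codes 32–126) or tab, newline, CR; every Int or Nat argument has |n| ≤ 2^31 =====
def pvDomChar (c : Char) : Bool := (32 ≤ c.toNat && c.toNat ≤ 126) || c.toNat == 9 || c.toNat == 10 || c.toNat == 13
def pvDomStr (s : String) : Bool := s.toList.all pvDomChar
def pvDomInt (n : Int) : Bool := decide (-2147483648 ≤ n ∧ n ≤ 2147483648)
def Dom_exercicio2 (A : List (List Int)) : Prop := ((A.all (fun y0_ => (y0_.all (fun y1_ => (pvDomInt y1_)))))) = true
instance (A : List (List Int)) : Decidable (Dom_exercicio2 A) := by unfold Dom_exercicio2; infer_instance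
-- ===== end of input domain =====

-- B replaces A's explicitly built transpose/identity/product matrices by a direct
-- delta check of the dot products with early exit; same return value on Pre_ (where A returns).

-- shared total indexing helper: A[j][i] with 0 as the out-of-range default (Pre_ keeps indices in range)
def pvE (A : List (List Int)) (j i : Nat) : Int := ((A[j]?.getD [])[i]?.getD 0)

-- ===== PORT A =====
def exercicio2 (A : List (List Int)) : Bool :=
  let n := A.length
  let c0 := (A[0]?.getD []).length
  let transp : List (List Int) := (List.range c0).map (fun i => (List.range n).map (fun j => pvE A j i))
  let iden : List (List Int) := (List.range n).map (fun j => (List.range n).map (fun k => if j ≠ k then (0:Int) else 1))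
  let C : List (List Int) := (List.range n).map (fun a => (List.range n).map (fun b =>
    (List.range n).foldl (fun valor m => valor + pvE A a m * ((transp[m]?.getD [])[b]?.getD 0)) 0))
  if C = iden then true else false

-- ===== PORT B =====
def exercicio2_alt (A : List (List Int)) : Bool :=
  let n := A.length
  (List.range n).all (fun a => (List.range n).all (fun b =>
    ((List.range n).foldl (fun s m => s + pvE A a m * pvE A b m) 0)
      == (if a = b then (1:Int) else 0)))

-- ===== PRECONDITION & SPEC =====
-- Pre_ is exactly the set of inputs on which the Python A returns (elsewhere it raises
-- IndexError): A non-empty, every row at least as long as row 0, and len(A) ≤ len(A[0]).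
def Pre_exercicio2 (A : List (List Int)) : Prop :=
  A ≠ [] ∧ A.length ≤ (A.headD []).length ∧ ∀ r ∈ A, (A.headD []).length ≤ r.length
instance (A : List (List Int)) : Decidable (Pre_exercicio2 A) := by unfold Pre_exercicio2; infer_instance
def pvWitness_exercicio2 : List (List Int) := [[1, 0], [0, 1]]
def Spec_exercicio2 (A : List (List Int)) (out : Bool) : Prop := out = exercicio2_alt A
instance (A : List (List Int)) (out : Bool) : Decidable (Spec_exercicio2 A out) := by unfold Spec_exercicio2; infer_instance

-- ===== CLAIM (what is proved, stated in full; the proofs are below) =====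
def Claim_equal_exercicio2 : Prop := ∀ (A : List (List Int)), Dom_exercicio2 A → Pre_exercicio2 A → Spec_exercicio2 A (exercicio2 A)

-- ===== LEMMAS AND PROOFS =====

-- the transpose lookup of port A is plain indexing, for in-range m
lemma transp_get (A : List (List Int)) (m b : Nat)
    (hm : m < (A[0]?.getD []).length) :
    ((((List.range (A[0]?.getD []).length).map
        (fun i => (List.range A.length).map (fun j => pvE A j i)))[m]?.getD [])[b]?.getD 0)
      = if b < A.length then pvE A b m else 0 := by
  rw [List.getElem?_map, List.getElem?_range hm]
  simp only [Option.map_some, Option.getD_some, List.getElem?_map]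
  by_cases hb : b < A.length
  · rw [List.getElem?_range hb]; simp [hb]
  · rw [List.getElem?_eq_none (by simpa using Nat.le_of_not_lt hb)]; simp [hb]

-- under Pre_, port A's inner product over the transpose equals port B's direct dot product
lemma sum_eq (A : List (List Int)) (hlen : A.length ≤ (A[0]?.getD []).length)
    (a b : Nat) (hb : b < A.length) :
    (List.range A.length).foldl (fun valor m => valor + pvE A a m *
        ((((List.range (A[0]?.getD []).length).map
            (fun i => (List.range A.length).map (fun j => pvE A j i)))[m]?.getD [])[b]?.getD 0)) 0
    = (List.range A.length).foldl (fun s m => s + pvE A a m * pvE A b m) 0 := by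
  apply PySem.List.foldl_congr_mem
  intro acc m hm
  rw [transp_get A m b (lt_of_lt_of_le (List.mem_range.mp hm) hlen), if_pos hb]

lemma exercicio2_eq (A : List (List Int)) (hpre : Pre_exercicio2 A) :
    exercicio2 A = exercicio2_alt A := by
  obtain ⟨hne, hlen, -⟩ := hpre
  have hc0 : (A.headD []).length = (A[0]?.getD []).length := by
    cases A with | nil => exact absurd rfl hne | cons x xs => simp
  rw [hc0] at hlen
  unfold exercicio2 exercicio2_alt
  have hkey : ((List.range A.length).map (fun a => (List.range A.length).map (fun b =>
        (List.range A.length).foldl (fun valor m => valor + pvE A a m *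
          ((((List.range (A[0]?.getD []).length).map
              (fun i => (List.range A.length).map (fun j => pvE A j i)))[m]?.getD [])[b]?.getD 0)) 0))
      = (List.range A.length).map (fun j => (List.range A.length).map
          (fun k => if j ≠ k then (0:Int) else 1)))
      ↔ (∀ a ∈ List.range A.length, ∀ b ∈ List.range A.length,
          (List.range A.length).foldl (fun s m => s + pvE A a m * pvE A b m) 0
            = if a = b then (1:Int) else 0) := by
    rw [List.map_inj_left]
    apply forall₂_congr
    intro a ha
    rw [List.map_inj_left]
    apply forall₂_congr
    intro b hb
    rw [sum_eq A hlen a b (List.mem_range.mp hb), ite_not]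
  rw [Bool.eq_iff_iff]
  simp only [List.all_eq_true, beq_iff_eq]
  split_ifs with hC
  · simp only [true_iff]
    exact hkey.mp hC
  · simp only [false_iff]
    exact fun h => hC (hkey.mpr h)

-- ===== VERDICT (by name: the statement is the Claim_ definition above) =====
theorem exercicio2_spec : Claim_equal_exercicio2 := by
  intro A _ hpre
  exact exercicio2_eq A hpre
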